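-- pv_equiv track=rewrite | github.com/zzandland/Algo-DS | GrokkingDP/5/min_del_to_sorted_seq.py | bu
-- ===== SOURCE A (Python) =====
-- from typing import List
--
-- def bu(nums: List[int]) -> int:
--     """
--     >>> bu([4,2,3,6,10,1,12])
--     2
--     >>> bu([-4,10,3,7,15])
--     1
--     >>> bu([3,2,1,0])
--     3
--     """
--     N, mx = len(nums), 1
--     dp = [1] * N
--     for i in range(1, N):
--         for j in range(i):
--             if nums[i] > nums[j] and dp[i] <= dp[j]: dp[i] += 1
--         mx = max(mx, dp[i])
--     return N-mx
-- ===== SOURCE B (Python) =====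
-- from typing import List
--
-- def bu(nums: List[int]) -> int:
--     # patience-style: tails[k] = smallest value ending a strict increasing
--     # subsequence of length k+1; answer = len(nums) - len(tails)
--     tails = []
--     for x in nums:
--         for k in range(len(tails)):
--             if tails[k] >= x:
--                 tails[k] = x
--                 break
--         else:
--             tails.append(x)
--     return len(nums) - len(tails)
-- ===== Notes on version B (the rewrite author's own statement) =====
-- stated objective: faster
-- what changed: Replaces the quadratic longest-increasing-subsequence DP (for every i rescan all j<i) by a patience-sorting pass that maintains the tails array (smallest ending value per LIS length) and replaces the first tail >= x, so the inner scan runs over the tails (length = LIS) instead of over all previous elements.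
-- intended difference: On the empty list A returns -1 because mx is initialised to 1 before any element is seen, while B returns 0, the intended number of deletions from an already-sorted empty sequence. — e.g. on bu([]): A returns -1, B returns 0
import Mathlib
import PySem

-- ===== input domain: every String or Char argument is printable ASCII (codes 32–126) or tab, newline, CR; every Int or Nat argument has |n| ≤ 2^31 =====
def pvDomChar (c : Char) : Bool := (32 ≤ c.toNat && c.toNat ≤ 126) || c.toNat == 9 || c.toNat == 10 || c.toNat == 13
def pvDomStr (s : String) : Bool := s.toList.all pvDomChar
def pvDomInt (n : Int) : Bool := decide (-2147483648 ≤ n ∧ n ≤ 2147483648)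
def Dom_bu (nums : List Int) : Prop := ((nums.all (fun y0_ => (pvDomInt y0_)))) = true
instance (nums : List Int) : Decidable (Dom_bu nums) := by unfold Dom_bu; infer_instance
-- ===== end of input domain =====

-- B replaces the quadratic LIS DP by a patience-sorting pass over a tails array; equivalence is proved on all non-empty inputs, the empty list is an intended difference (A returns -1, B returns 0).

-- ===== PORT A =====
-- one outer step of A: recompute dp[i] by the inner scan over j < i, update dp and mx
def buStep (nums : List Int) (s : List Int × Int) (i : Nat) : List Int × Int :=
  let dpi := (List.range i).foldl
      (fun c j => if nums.getD j 0 < nums.getD i 0 ∧ c ≤ s.1.getD j 0 then c + 1 else c)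
      (s.1.getD i 0)
  (s.1.set i dpi, max s.2 dpi)

def bu (nums : List Int) : Int :=
  (nums.length : Int) -
    ((List.range' 1 (nums.length - 1)).foldl (buStep nums) (List.replicate nums.length (1 : Int), 1)).2

-- ===== PORT B =====
-- replace the first tail ≥ x by x, or append x if every tail is < x (the for/else scan in Source B)
def insertTail (t : List Int) (x : Int) : List Int :=
  match t with
  | [] => [x]
  | a :: ts => if x ≤ a then x :: ts else a :: insertTail ts x

def bu_alt (nums : List Int) : Int :=
  (nums.length : Int) - ((nums.foldl insertTail []).length : Int)

-- ===== PRECONDITION & SPEC =====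
-- On the empty list A returns -1 because mx is initialised to 1 before any element is seen, while B returns 0, the intended number of deletions.
def D_bu (nums : List Int) : Prop := nums = []
instance (nums : List Int) : Decidable (D_bu nums) := by unfold D_bu; infer_instance

def Spec_bu (nums : List Int) (out : Int) : Prop := ¬ D_bu nums → out = bu_alt nums
instance (nums : List Int) (out : Int) : Decidable (Spec_bu nums out) := by unfold Spec_bu; infer_instance

def pvDiffWitness_bu : List Int := []
def pvDiffWitnessOut_bu : Int × Int := (-1, 0)

-- ===== CLAIM (what is proved, stated in full; the proofs are below) =====
def Claim_unchanged_bu : Prop := ∀ (nums : List Int), Dom_bu nums → Spec_bu nums (bu nums)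
def Claim_changed_bu : Prop := Dom_bu (pvDiffWitness_bu) ∧ D_bu (pvDiffWitness_bu) ∧ bu (pvDiffWitness_bu) = pvDiffWitnessOut_bu.1 ∧ bu_alt (pvDiffWitness_bu) = pvDiffWitnessOut_bu.2 ∧ pvDiffWitnessOut_bu.1 ≠ pvDiffWitnessOut_bu.2
def Claim_exact_bu : Prop := ∀ (nums : List Int), Dom_bu nums → D_bu nums → bu nums ≠ bu_alt nums

-- ===== LEMMAS AND PROOFS =====

-- spec: zs = list of (value, length of longest strictly increasing subsequence ending there)
def maxUnder (x : Int) (zs : List (Int × Int)) : Int :=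
  zs.foldl (fun m al => if al.1 < x then max m al.2 else m) 0

def lsOf (nums : List Int) : List (Int × Int) :=
  nums.foldl (fun acc x => acc ++ [(x, 1 + maxUnder x acc)]) []

def maxSnd (zs : List (Int × Int)) : Int :=
  zs.foldl (fun m al => max m al.2) 0

-- the chain property: an ending length > 1 has a predecessor of length ≥ l - 1
def Chain (zs : List (Int × Int)) : Prop :=
  ∀ m (h : m < zs.length), 1 < zs[m].2 →
    ∃ j, ∃ _ : j < m, zs[j].1 < zs[m].1 ∧ zs[m].2 ≤ zs[j].2 + 1

theorem maxUnder_cons (x : Int) (b : Int × Int) (zs : List (Int × Int)) :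
    maxUnder x (b :: zs) = max (if b.1 < x then max 0 b.2 else 0) (maxUnder x zs) := by
  have init : ∀ (zs : List (Int × Int)) (a b : Int),
      zs.foldl (fun m al => if al.1 < x then max m al.2 else m) (max a b)
        = max a (zs.foldl (fun m al => if al.1 < x then max m al.2 else m) b) := by
    intro zs
    induction zs with
    | nil => intro a b; simp
    | cons hd tl ih =>
      intro a b
      simp only [List.foldl_cons]
      by_cases h : hd.1 < x
      · simp only [h, if_true, max_assoc]; exact ih a (max b hd.2)
      · simp only [h, if_false]; exact ih a b
  have init2 : ∀ a : Int, 0 ≤ a →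
      zs.foldl (fun m al => if al.1 < x then max m al.2 else m) a = max a (maxUnder x zs) := by
    intro a ha
    have := init zs a 0
    rw [max_eq_left ha] at this
    exact this
  simp only [maxUnder, List.foldl_cons]
  by_cases h : b.1 < x
  · simp only [h, if_true]
    exact init2 (max 0 b.2) (le_max_left _ _)
  · simp only [h, if_false]
    exact init2 0 le_rfl

theorem maxUnder_nonneg (x : Int) (zs : List (Int × Int)) : 0 ≤ maxUnder x zs := by
  induction zs with
  | nil => simp [maxUnder]
  | cons b tl ih =>
    rw [maxUnder_cons]
    by_cases h : b.1 < x <;> simp only [h, if_true, if_false] <;> omega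

theorem maxUnder_bound (x : Int) (zs : List (Int × Int)) :
    ∀ al ∈ zs, al.1 < x → al.2 ≤ maxUnder x zs := by
  induction zs with
  | nil => simp
  | cons b tl ih =>
    intro al hal hlt
    rw [maxUnder_cons]
    rcases List.mem_cons.mp hal with h | h
    · subst h; simp only [hlt, if_true]; omega
    · have := ih al h hlt; omega

theorem maxUnder_attain (x : Int) (zs : List (Int × Int)) :
    maxUnder x zs = 0 ∨ ∃ al ∈ zs, al.1 < x ∧ maxUnder x zs = max 0 al.2 := by
  induction zs with
  | nil => left; simp [maxUnder]
  | cons b tl ih =>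
    rw [maxUnder_cons]
    by_cases h : b.1 < x
    · simp only [h, if_true]
      by_cases hle : maxUnder x tl ≤ max 0 b.2
      · right; exact ⟨b, by simp, h, by omega⟩
      · have hn := maxUnder_nonneg x tl
        rcases ih with h0 | ⟨al, hmem, halx, heq⟩
        · omega
        · right; exact ⟨al, by simp [hmem], halx, by omega⟩
    · simp only [h, if_false]
      have hn := maxUnder_nonneg x tl
      rcases ih with h0 | ⟨al, hmem, halx, heq⟩
      · left; omega
      · right; exact ⟨al, by simp [hmem], halx, by omega⟩

theorem maxUnder_append (x : Int) (zs : List (Int × Int)) (b : Int × Int) :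
    maxUnder x (zs ++ [b]) = if b.1 < x then max (maxUnder x zs) b.2 else maxUnder x zs := by
  simp [maxUnder, List.foldl_append]

theorem maxSnd_cons (b : Int × Int) (zs : List (Int × Int)) :
    maxSnd (b :: zs) = max (max 0 b.2) (maxSnd zs) := by
  have init : ∀ (zs : List (Int × Int)) (a b : Int),
      zs.foldl (fun m al => max m al.2) (max a b)
        = max a (zs.foldl (fun m al => max m al.2) b) := by
    intro zs
    induction zs with
    | nil => intro a b; simp
    | cons hd tl ih =>
      intro a b
      simp only [List.foldl_cons, max_assoc]
      exact ih a (max b hd.2)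
  simp only [maxSnd, List.foldl_cons]
  have := init zs (max 0 b.2) 0
  simpa using this

theorem maxSnd_nonneg (zs : List (Int × Int)) : 0 ≤ maxSnd zs := by
  induction zs with
  | nil => simp [maxSnd]
  | cons b tl ih => rw [maxSnd_cons]; omega

theorem maxSnd_bound (zs : List (Int × Int)) : ∀ al ∈ zs, al.2 ≤ maxSnd zs := by
  induction zs with
  | nil => simp
  | cons b tl ih =>
    intro al hal
    rw [maxSnd_cons]
    rcases List.mem_cons.mp hal with h | h
    · subst h; omega
    · have := ih al h; omega

theorem maxSnd_append (zs : List (Int × Int)) (b : Int × Int) :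
    maxSnd (zs ++ [b]) = max (maxSnd zs) (max 0 b.2) := by
  have h : maxSnd (zs ++ [b]) = max (maxSnd zs) b.2 := by
    simp [maxSnd, List.foldl_append]
  have hn := maxSnd_nonneg zs
  omega

theorem lsOf_append (xs : List Int) (x : Int) :
    lsOf (xs ++ [x]) = lsOf xs ++ [(x, 1 + maxUnder x (lsOf xs))] := by
  simp [lsOf, List.foldl_append]

theorem lsOf_fst (nums : List Int) : (lsOf nums).map Prod.fst = nums := by
  induction nums using List.reverseRecOn with
  | nil => simp [lsOf]
  | append_singleton xs x ih => rw [lsOf_append]; simp [ih]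

theorem lsOf_length (nums : List Int) : (lsOf nums).length = nums.length := by
  have := congrArg List.length (lsOf_fst nums)
  simpa using this

theorem lsOf_pos (nums : List Int) : ∀ al ∈ lsOf nums, 1 ≤ al.2 := by
  induction nums using List.reverseRecOn with
  | nil => simp [lsOf]
  | append_singleton xs x ih =>
    rw [lsOf_append]
    intro al hal
    rcases List.mem_append.mp hal with h | h
    · exact ih al h
    · simp at h; subst h; have := maxUnder_nonneg x (lsOf xs); simp; omega

theorem lsOf_chain (nums : List Int) : Chain (lsOf nums) := by
  induction nums using List.reverseRecOn with
  | nil => intro m h; simp [lsOf] at h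
  | append_singleton xs x ih =>
    rw [lsOf_append]
    intro m hm hgt
    by_cases hlt : m < (lsOf xs).length
    · have e1 : ((lsOf xs) ++ [(x, 1 + maxUnder x (lsOf xs))])[m]'hm = (lsOf xs)[m] :=
        List.getElem_append_left hlt
      rw [e1] at hgt ⊢
      obtain ⟨j, hj, h1, h2⟩ := ih m hlt hgt
      have hjl : j < (lsOf xs).length := lt_trans hj hlt
      refine ⟨j, hj, ?_, ?_⟩
      · rw [List.getElem_append_left hjl]; exact h1
      · rw [List.getElem_append_left hjl]; exact h2
    · have hml : m = (lsOf xs).length := by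
        simp only [List.length_append, List.length_cons, List.length_nil] at hm
        omega
      have e1 : ((lsOf xs) ++ [(x, 1 + maxUnder x (lsOf xs))])[m]'hm
          = (x, 1 + maxUnder x (lsOf xs)) := by
        subst hml
        rw [List.getElem_append_right le_rfl]
        simp
      rw [e1] at hgt ⊢
      have hU : 0 < maxUnder x (lsOf xs) := by simp at hgt; omega
      rcases maxUnder_attain x (lsOf xs) with h0 | ⟨al, hmem, hax, heq⟩
      · omega
      · have hp := lsOf_pos xs al hmem
        obtain ⟨j, hj, hje⟩ := List.mem_iff_getElem.mp hmem
        refine ⟨j, by omega, ?_, ?_⟩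
        · rw [List.getElem_append_left hj, hje]; exact hax
        · rw [List.getElem_append_left hj, hje]; simp; omega

-- A's inner loop computes 1 + maxUnder, thanks to the chain property
theorem inner_eq (x : Int) (zs : List (Int × Int)) (hch : Chain zs) (hpos : ∀ al ∈ zs, 1 ≤ al.2)
    (a d : Nat → Int) (m : Nat) (hm : m ≤ zs.length)
    (ha : ∀ j (h : j < zs.length), a j = zs[j].1) (hd : ∀ j (h : j < zs.length), d j = zs[j].2) :
    (List.range m).foldl (fun c j => if a j < x ∧ c ≤ d j then c + 1 else c) 1
      = 1 + maxUnder x (zs.take m) := by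
  induction m with
  | zero => simp [maxUnder]
  | succ m ihm =>
    have hm' : m < zs.length := by omega
    rw [List.range_succ, List.foldl_append, ihm (by omega)]
    have htake : zs.take (m+1) = zs.take m ++ [zs[m]] := by
      rw [List.take_add_one]
      simp [List.getElem?_eq_getElem hm']
    rw [htake, maxUnder_append]
    simp only [List.foldl_cons, List.foldl_nil]
    rw [ha m hm', hd m hm']
    by_cases hax : zs[m].1 < x
    · simp only [hax, if_true, true_and]
      by_cases hcd : 1 + maxUnder x (zs.take m) ≤ zs[m].2
      · have hle : zs[m].2 ≤ maxUnder x (zs.take m) + 1 := by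
          by_cases h1 : 1 < zs[m].2
          · obtain ⟨j, hj, hfst, hsnd⟩ := hch m hm' h1
            have hjl : j < zs.length := lt_trans hj hm'
            have hmem : zs[j] ∈ zs.take m := by
              rw [List.mem_iff_getElem]
              exact ⟨j, by simp; omega, List.getElem_take⟩
            have := maxUnder_bound x (zs.take m) zs[j] hmem (lt_trans hfst hax)
            omega
          · have h2 := hpos zs[m] (List.getElem_mem hm')
            have h3 := maxUnder_nonneg x (zs.take m)
            omega
        simp only [hcd, if_true]
        omega
      · simp only [hcd, if_false]
        omega
    · simp [hax]

-- A's outer loop invariant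
theorem getD_append_left (l1 l2 : List Int) (j : Nat) (h : j < l1.length) :
    (l1 ++ l2).getD j 0 = l1.getD j 0 := by
  rw [List.getD_eq_getElem _ _ (by simp; omega), List.getD_eq_getElem _ _ h]
  exact List.getElem_append_left h

theorem getD_append_len (l1 : List Int) (k : Nat) (v : Int) :
    (l1 ++ List.replicate (k+1) v).getD l1.length 0 = v := by
  rw [List.getD_eq_getElem _ _ (by simp)]
  rw [List.getElem_append_right le_rfl]
  simp

theorem A_fold (nums : List Int) (m : Nat) (hN : 1 ≤ nums.length) (hm : m ≤ nums.length - 1) :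
    (List.range' 1 m).foldl (buStep nums) (List.replicate nums.length (1 : Int), 1)
      = ((lsOf (nums.take (m+1))).map Prod.snd ++ List.replicate (nums.length - (m+1)) (1 : Int),
         (lsOf (nums.take (m+1))).foldl (fun mx al => max mx al.2) 1) := by
  induction m with
  | zero =>
    obtain ⟨a, tl, rfl⟩ : ∃ a tl, nums = a :: tl := by
      cases nums with
      | nil => simp at hN
      | cons a tl => exact ⟨a, tl, rfl⟩
    simp [lsOf, maxUnder, List.replicate_succ]
  | succ m ihm =>
    have hmN : m + 1 < nums.length := by omega
    have hrange : List.range' 1 (m+1) = List.range' 1 m ++ [1+m] := by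
      rw [List.range'_concat]
      norm_num
    rw [hrange, List.foldl_append, ihm (by omega)]
    have hPlen : (lsOf (nums.take (m+1))).length = m + 1 := by
      rw [lsOf_length, List.length_take]; omega
    have hLlen : ((lsOf (nums.take (m+1))).map Prod.snd).length = m + 1 := by
      simp [hPlen]
    have hrep : nums.length - (m+1) = (nums.length - (m+2)) + 1 := by omega
    simp only [List.foldl_cons, List.foldl_nil]
    unfold buStep
    -- the initial value dp[i] is 1 (from the replicate part)
    have hinit : ((lsOf (nums.take (m+1))).map Prod.snd
        ++ List.replicate (nums.length - (m+1)) (1:Int)).getD (1+m) 0 = 1 := by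
      rw [hrep, show 1+m = ((lsOf (nums.take (m+1))).map Prod.snd).length by omega]
      exact getD_append_len _ _ _
    -- the inner loop computes 1 + maxUnder
    have hinner : (List.range (1+m)).foldl
        (fun c j => if nums.getD j 0 < nums.getD (1+m) 0 ∧ c ≤
          ((lsOf (nums.take (m+1))).map Prod.snd
            ++ List.replicate (nums.length - (m+1)) (1:Int)).getD j 0 then c + 1 else c) 1
        = 1 + maxUnder (nums.getD (1+m) 0) (lsOf (nums.take (m+1))) := by
      have h := inner_eq (nums.getD (1+m) 0) (lsOf (nums.take (m+1)))
        (lsOf_chain _) (lsOf_pos _)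
        (fun j => nums.getD j 0)
        (fun j => ((lsOf (nums.take (m+1))).map Prod.snd
            ++ List.replicate (nums.length - (m+1)) (1:Int)).getD j 0)
        (1+m) (by omega)
        (by
          intro j hj
          dsimp only
          have hjm : j < m + 1 := by omega
          have hfst := lsOf_fst (nums.take (m+1))
          have h1 : (lsOf (nums.take (m+1)))[j].1
              = ((lsOf (nums.take (m+1))).map Prod.fst)[j]'(by simp [hPlen]; omega) := by
            simp
          rw [h1]
          simp only [hfst]
          rw [List.getElem_take, List.getD_eq_getElem _ _ (by omega)]
          )
        (by
          intro j hj
          dsimp only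
          have hjm : j < m + 1 := by omega
          rw [getD_append_left _ _ _ (by omega)]
          rw [List.getD_eq_getElem _ _ (by simp [hPlen]; omega)]
          simp)
      rw [h]
      rw [show (lsOf (nums.take (m+1))).take (1+m) = lsOf (nums.take (m+1)) by
        rw [show 1+m = (lsOf (nums.take (m+1))).length by omega, List.take_length]]
    rw [hinit, hinner]
    have htk : nums.take (m+1+1) = nums.take (m+1) ++ [nums[m+1]'hmN] := by
      rw [List.take_add_one]
      simp [List.getElem?_eq_getElem hmN]
    have hx : nums.getD (1+m) 0 = nums[m+1]'hmN := by
      rw [List.getD_eq_getElem _ _ (by omega)]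
      congr 1
      omega
    rw [htk, lsOf_append, hx]
    simp only [Prod.mk.injEq]
    constructor
    · -- dp lists agree
      rw [hrep, List.replicate_succ]
      rw [show (1:Nat)+m = ((lsOf (nums.take (m+1))).map Prod.snd).length by omega]
      simp
    · -- mx agrees
      rw [List.foldl_append]
      simp

-- B's invariant: tails length = maxSnd, tails[k] = min value with ending length ≥ k+1
def Tinv (zs : List (Int × Int)) (t : List Int) : Prop :=
  ((t.length : Int) = maxSnd zs) ∧
  ∀ k (hk : k < t.length),
    (∃ al ∈ zs, (k : Int) + 1 ≤ al.2 ∧ al.1 = t[k]) ∧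
    (∀ al ∈ zs, (k : Int) + 1 ≤ al.2 → t[k] ≤ al.1)

theorem insertTail_of_all_lt (t : List Int) (x : Int)
    (hall : ∀ k (hk : k < t.length), ¬ x ≤ t[k]) : insertTail t x = t ++ [x] := by
  induction t with
  | nil => simp [insertTail]
  | cons a ts ih =>
    have h0 := hall 0 (by simp)
    simp only [List.getElem_cons_zero] at h0
    simp only [insertTail, h0, if_false, List.cons_append, List.cons.injEq, true_and]
    exact ih (fun k hk => by
      have := hall (k+1) (by simp; omega)
      simpa using this)

theorem insertTail_of_found (t : List Int) (x : Int) (u : Nat) (hu : u < t.length)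
    (hlt : ∀ k (hk : k < t.length), k < u → ¬ x ≤ t[k]) (hge : x ≤ t[u]) :
    insertTail t x = t.set u x := by
  induction t generalizing u with
  | nil => simp at hu
  | cons a ts ih =>
    cases u with
    | zero =>
      simp only [List.getElem_cons_zero] at hge
      simp [insertTail, hge]
    | succ u =>
      have h0 := hlt 0 (by simp) (by omega)
      simp only [List.getElem_cons_zero] at h0
      simp only [insertTail, h0, if_false, List.set_cons_succ, List.cons.injEq, true_and]
      exact ih u (by simpa using hu)
        (fun k hk hklt => by
          have := hlt (k+1) (by simp; omega) (by omega)
          simpa using this)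
        (by simpa using hge)

theorem Tinv_step (zs : List (Int × Int)) (t : List Int) (x : Int)
    (h : Tinv zs t) (hpos : ∀ al ∈ zs, 1 ≤ al.2) :
    Tinv (zs ++ [(x, 1 + maxUnder x zs)]) (insertTail t x) := by
  obtain ⟨hlen, hk⟩ := h
  have hU0 : 0 ≤ maxUnder x zs := maxUnder_nonneg x zs
  have hchar : ∀ k (hk' : k < t.length), (t[k] < x ↔ (k : Int) < maxUnder x zs) := by
    intro k hk'
    constructor
    · intro hlt
      obtain ⟨⟨al, hmem, hge, heq⟩, _⟩ := hk k hk'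
      have := maxUnder_bound x zs al hmem (by rw [heq]; exact hlt)
      omega
    · intro hkU
      rcases maxUnder_attain x zs with h0 | ⟨al, hmem, hax, heq⟩
      · omega
      · have hp := hpos al hmem
        have := (hk k hk').2 al hmem (by omega)
        omega
  have hUlen : maxUnder x zs ≤ (t.length : Int) := by
    rcases maxUnder_attain x zs with h0 | ⟨al, hmem, hax, heq⟩
    · omega
    · have := maxSnd_bound zs al hmem
      have hp := hpos al hmem
      omega
  by_cases hcase : maxUnder x zs = (t.length : Int)
  · -- all tails are < x: append
    have heq : insertTail t x = t ++ [x] := by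
      apply insertTail_of_all_lt
      intro k hk'
      have := (hchar k hk').mpr (by omega)
      omega
    rw [heq]
    refine ⟨?_, ?_⟩
    · rw [maxSnd_append]
      simp only [List.length_append, List.length_cons, List.length_nil]
      push_cast
      omega
    · intro k hk'
      simp only [List.length_append, List.length_cons, List.length_nil] at hk'
      by_cases hklt : k < t.length
      · have hget : (t ++ [x])[k]'(by simp; omega) = t[k] := List.getElem_append_left hklt
        obtain ⟨⟨al, hmem, hge, hale⟩, hub⟩ := hk k hklt
        refine ⟨⟨al, by simp [hmem], hge, by rw [hget]; exact hale⟩, ?_⟩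
        intro al' hmem' hge'
        rcases List.mem_append.mp hmem' with hm | hm
        · rw [hget]; exact hub al' hm hge'
        · simp only [List.mem_singleton] at hm
          subst hm
          have := (hchar k hklt).mpr (by omega)
          rw [hget]
          simpa using le_of_lt this
      · have hkeq : k = t.length := by omega
        subst hkeq
        have hget : (t ++ [x])[t.length]'(by simp) = x := by
          rw [List.getElem_append_right le_rfl]; simp
        refine ⟨⟨(x, 1 + maxUnder x zs), by simp, by simp; omega, by rw [hget]⟩, ?_⟩
        intro al' hmem' hge'
        rcases List.mem_append.mp hmem' with hm | hm
        · have := maxSnd_bound zs al' hm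
          omega
        · simp only [List.mem_singleton] at hm
          subst hm
          rw [hget]
  · -- replace the first tail ≥ x, at index maxUnder
    have hUlt : maxUnder x zs < (t.length : Int) := lt_of_le_of_ne hUlen hcase
    have huI : ((maxUnder x zs).toNat : Int) = maxUnder x zs := Int.toNat_of_nonneg hU0
    have hult : (maxUnder x zs).toNat < t.length := by omega
    have hxu : x ≤ t[(maxUnder x zs).toNat] := by
      by_contra hc
      push Not at hc
      have := (hchar _ hult).mp hc
      omega
    have heq : insertTail t x = t.set (maxUnder x zs).toNat x := by
      apply insertTail_of_found t x _ hult
      · intro k hk' hklt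
        have := (hchar k hk').mpr (by omega)
        omega
      · exact hxu
    rw [heq]
    refine ⟨?_, ?_⟩
    · rw [maxSnd_append]
      simp only [List.length_set]
      omega
    · intro k hk'
      simp only [List.length_set] at hk'
      by_cases hku : k = (maxUnder x zs).toNat
      · subst hku
        have hget : (t.set (maxUnder x zs).toNat x)[(maxUnder x zs).toNat]'(by simp; omega) = x :=
          List.getElem_set_self _
        refine ⟨⟨(x, 1 + maxUnder x zs), by simp, by simp; omega, by rw [hget]⟩, ?_⟩
        intro al' hmem' hge'
        rcases List.mem_append.mp hmem' with hm | hm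
        · have hub := (hk _ hult).2 al' hm (by omega)
          rw [hget]; omega
        · simp only [List.mem_singleton] at hm
          subst hm
          rw [hget]
      · have hget : (t.set (maxUnder x zs).toNat x)[k]'(by simp; omega) = t[k]'(by omega) :=
          List.getElem_set_ne (by omega) _
        obtain ⟨⟨al, hmem, hge, hale⟩, hub⟩ := hk k (by omega)
        refine ⟨⟨al, by simp [hmem], hge, by rw [hget]; exact hale⟩, ?_⟩
        intro al' hmem' hge'
        rcases List.mem_append.mp hmem' with hm | hm
        · rw [hget]; exact hub al' hm hge'
        · simp only [List.mem_singleton] at hm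
          subst hm
          simp only at hge'
          have := (hchar k (by omega)).mpr (by omega)
          rw [hget]
          simpa using le_of_lt this

theorem B_fold (nums : List Int) : Tinv (lsOf nums) (nums.foldl insertTail []) := by
  induction nums using List.reverseRecOn with
  | nil =>
    refine ⟨by simp [lsOf, maxSnd], ?_⟩
    intro k hk
    simp at hk
  | append_singleton xs x ih =>
    rw [lsOf_append, List.foldl_append]
    simp only [List.foldl_cons, List.foldl_nil]
    exact Tinv_step _ _ _ ih (lsOf_pos xs)

theorem max_foldl_init (zs : List (Int × Int)) (a : Int) (ha : 0 ≤ a) :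
    zs.foldl (fun m al => max m al.2) a = max a (maxSnd zs) := by
  induction zs generalizing a with
  | nil => simp [maxSnd]; omega
  | cons hd tl ih =>
    have hn := maxSnd_nonneg tl
    rw [List.foldl_cons, ih (max a hd.2) (by omega), maxSnd_cons]
    omega

-- ===== VERDICT (by name: the statement is the Claim_ definition above) =====
theorem bu_spec : Claim_unchanged_bu := by
  intro nums _ hnd
  unfold D_bu at hnd
  have hd := hnd
  have hN : 1 ≤ nums.length := by
    cases nums with
    | nil => exact absurd rfl hd
    | cons a t => simp
  have hA := A_fold nums (nums.length - 1) hN le_rfl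
  rw [show nums.length - 1 + 1 = nums.length by omega, List.take_length] at hA
  unfold bu bu_alt
  rw [hA]
  obtain ⟨hlen, -⟩ := B_fold nums
  simp only
  rw [max_foldl_init _ _ (by omega)]
  have hnil : lsOf nums ≠ [] := by
    intro hc
    have := lsOf_length nums
    rw [hc] at this
    simp at this
    exact hd (List.eq_nil_of_length_eq_zero this.symm)
  obtain ⟨al, hmem⟩ := List.exists_mem_of_ne_nil (lsOf nums) hnil
  have h1 := lsOf_pos nums al hmem
  have h2 := maxSnd_bound (lsOf nums) al hmem
  rw [← hlen] at h2 ⊢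
  omega

theorem bu_changed : Claim_changed_bu := by unfold Claim_changed_bu; decide

theorem bu_tight : Claim_exact_bu := by
  intro nums _ hd
  subst hd
  decide
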